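-- pv_equiv track=rewrite | github.com/KyleCZY/GEP_Comm | mutation.py | decoding_gene
-- ===== SOURCE A (Python) =====
-- operator_dict = {'add':2, 'sub':2, 'mul':2, 'div':2, 'sqrt':1,
--                  'log':1, 'abso':1, 'sqr':1, 'inv':1, 'maxm':2,
--                  'minm':2, 'mean':2, 'delay':2, 'delta':2, 'delta_perc':2,
--                  'neg':1, 'scale':1, 'rw_argmax':2, 'rw_argmin':2,
--                  'rw_argmaxmin':2, 'rw_max':2, 'rw_min':2, 'rw_ma':2,
--                  'rw_std':2, 'rw_maxmin_norm':2, 'rw_rank':2, 'rw_corr':2,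
--                  'rw_beta':2, 'rw_alpha':2, 'rw_wma':2,
--                  'mat_big':2, 'mat_small':2, 'mat_keep':2}
--
-- operator_list = list(operator_dict.keys())
--
-- def decoding_gene(gene_list):
--     para_pos = 0
--     func_pos_list = []
--     i = 0
--     while i <= para_pos:
--         if gene_list[i] in operator_list:
--             para_pos += operator_dict[gene_list[i]]
--             if para_pos >= len(gene_list):
--                 return False
--             func_pos_list.append(i)
--         i += 1
--     if len(func_pos_list) > 0:
--         return True
--     else:
--         return False
-- ===== SOURCE B (Python) =====
-- operator_dict = {'add':2, 'sub':2, 'mul':2, 'div':2, 'sqrt':1,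
--                  'log':1, 'abso':1, 'sqr':1, 'inv':1, 'maxm':2,
--                  'minm':2, 'mean':2, 'delay':2, 'delta':2, 'delta_perc':2,
--                  'neg':1, 'scale':1, 'rw_argmax':2, 'rw_argmin':2,
--                  'rw_argmaxmin':2, 'rw_max':2, 'rw_min':2, 'rw_ma':2,
--                  'rw_std':2, 'rw_maxmin_norm':2, 'rw_rank':2, 'rw_corr':2,
--                  'rw_beta':2, 'rw_alpha':2, 'rw_wma':2,
--                  'mat_big':2, 'mat_small':2, 'mat_keep':2}
--
-- def decoding_gene(gene_list):
--     # prefix-expression parser: explicit stack of pending child counts;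
--     # succeeds iff the prefix tree completes within the gene, True iff it used an operator
--     n = len(gene_list)
--     stack = [1]          # the virtual root expects one expression
--     pos = 0
--     saw = False
--     while stack:
--         c = stack[-1]
--         if c == 0:
--             stack.pop()
--             continue
--         stack[-1] = c - 1
--         if pos >= n:
--             return False
--         ar = operator_dict.get(gene_list[pos], 0)
--         pos += 1
--         if ar:
--             saw = True
--             stack.append(ar)
--     return saw
-- ===== Notes on version B (the rewrite author's own statement) =====
-- stated objective: alternative
-- what changed: A walks indices 0..para_pos with a moving target counter and a list of operator positions; B parses the gene as one prefix expression with an explicit stack of pending child counts, consuming tokens and failing when a child position would overflow.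
import Mathlib
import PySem

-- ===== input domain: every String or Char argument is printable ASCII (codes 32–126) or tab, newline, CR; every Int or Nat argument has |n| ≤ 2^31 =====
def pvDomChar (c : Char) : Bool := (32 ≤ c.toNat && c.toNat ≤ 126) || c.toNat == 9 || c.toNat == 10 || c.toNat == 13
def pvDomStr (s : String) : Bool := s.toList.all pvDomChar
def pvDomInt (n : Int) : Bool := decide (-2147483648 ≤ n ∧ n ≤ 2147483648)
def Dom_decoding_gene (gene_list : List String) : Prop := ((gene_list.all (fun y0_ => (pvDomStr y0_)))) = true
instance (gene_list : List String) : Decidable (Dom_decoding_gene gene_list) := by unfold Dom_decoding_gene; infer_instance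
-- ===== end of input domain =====

-- B replaces A's index-vs-target-counter walk by an explicit-stack prefix-expression parser (alternative decomposition, same cost).


-- ===== PORT A =====
-- the module-level operator table (dict as association list) and its key list
def opPairs : List (String × Nat) :=
  [("add",2), ("sub",2), ("mul",2), ("div",2), ("sqrt",1),
   ("log",1), ("abso",1), ("sqr",1), ("inv",1), ("maxm",2),
   ("minm",2), ("mean",2), ("delay",2), ("delta",2), ("delta_perc",2),
   ("neg",1), ("scale",1), ("rw_argmax",2), ("rw_argmin",2),
   ("rw_argmaxmin",2), ("rw_max",2), ("rw_min",2), ("rw_ma",2),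
   ("rw_std",2), ("rw_maxmin_norm",2), ("rw_rank",2), ("rw_corr",2),
   ("rw_beta",2), ("rw_alpha",2), ("rw_wma",2),
   ("mat_big",2), ("mat_small",2), ("mat_keep",2)]

def operator_list : List String := opPairs.map Prod.fst

-- operator_dict[tok] (resp. operator_dict.get(tok, 0) on the B side)
def opArity (tok : String) : Nat := (opPairs.lookup tok).getD 0

-- A's while-loop: state (i, para_pos, func_pos_list); fuel gene.length+1 is enough (proved via the simulation lemmas)
def loopA (gene : List String) : Nat → Nat → Nat → List Nat → Bool
  | 0, _, _, _ => false
  | fuel+1, i, para, funcs =>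
    if i ≤ para then
      match gene[i]? with
      | none => false            -- gene_list[i] raises IndexError (only reachable for gene = [], excluded by Pre_)
      | some tok =>
        if tok ∈ operator_list then
          if gene.length ≤ para + opArity tok then false
          else loopA gene fuel (i+1) (para + opArity tok) (funcs ++ [i])
        else loopA gene fuel (i+1) para funcs
    else decide (0 < funcs.length)

def decoding_gene (gene_list : List String) : Bool :=
  loopA gene_list (gene_list.length + 1) 0 0 []

-- ===== PORT B =====
-- B's while-loop: stack of pending child counts (head = top of stack); fuel 2*len+4 is enough (proved below)
def loopB (gene : List String) : Nat → List Nat → Nat → Bool → Bool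
  | 0, _, _, _ => false
  | _+1, [], _, saw => saw
  | fuel+1, c :: rest, pos, saw =>
    if c = 0 then loopB gene fuel rest pos saw
    else if gene.length ≤ pos then false
    else
      let ar := opArity (gene.getD pos "")
      if 0 < ar then loopB gene fuel (ar :: (c-1) :: rest) (pos+1) true
      else loopB gene fuel ((c-1) :: rest) (pos+1) saw

def decoding_gene_alt (gene_list : List String) : Bool :=
  loopB gene_list (2 * gene_list.length + 4) [1] 0 false

-- ===== PRECONDITION & SPEC =====
-- Pre_ excludes only the empty list, on which A raises IndexError (it reads gene_list[0] before any guard; B returns False there).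
def Pre_decoding_gene (gene_list : List String) : Prop := gene_list ≠ []
instance (gene_list : List String) : Decidable (Pre_decoding_gene gene_list) := by unfold Pre_decoding_gene; infer_instance
def pvWitness_decoding_gene : List String := ["add", "x", "y"]

def Spec_decoding_gene (gene_list : List String) (out : Bool) : Prop := out = decoding_gene_alt gene_list
instance (gene_list : List String) (out : Bool) : Decidable (Spec_decoding_gene gene_list out) := by unfold Spec_decoding_gene; infer_instance

-- ===== CLAIM (what is proved, stated in full; the proofs are below) =====
def Claim_equal_decoding_gene : Prop := ∀ (gene_list : List String), Dom_decoding_gene gene_list → Pre_decoding_gene gene_list → Spec_decoding_gene gene_list (decoding_gene gene_list)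

-- ===== LEMMAS AND PROOFS =====

-- reference automaton both loops simulate: position, number of pending expressions, operator-seen flag
def runP (gene : List String) : Nat → Nat → Nat → Bool → Bool
  | 0, _, _, _ => false
  | fuel+1, pos, pending, saw =>
    if pending = 0 then saw
    else match gene[pos]? with
      | none => false
      | some tok =>
        runP gene fuel (pos+1) (pending - 1 + opArity tok) (saw || decide (0 < opArity tok))

-- membership in the key list coincides with positive arity (all arities in the table are positive)
theorem lookup_pos_iff (tok : String) (l : List (String × Nat)) (h : ∀ p ∈ l, 0 < p.2) :
    tok ∈ l.map Prod.fst ↔ 0 < (l.lookup tok).getD 0 := by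
  induction l with
  | nil => simp
  | cons p t ih =>
    have ih' := ih (fun q hq => h q (by simp [hq]))
    by_cases he : tok = p.1
    · subst he
      simp [List.lookup, h p (by simp)]
    · have hb : (tok == p.1) = false := beq_eq_false_iff_ne.mpr he
      simp [List.lookup, hb, he, ih']

theorem mem_iff_arity (tok : String) : tok ∈ operator_list ↔ 0 < opArity tok := by
  have : ∀ p ∈ opPairs, 0 < p.2 := by decide
  exact lookup_pos_iff tok opPairs this

-- once more expressions are pending than tokens remain, the automaton rejects
theorem runP_false (gene : List String) :
    ∀ fuel pos pending saw, 0 < pending → gene.length < pos + pending →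
      runP gene fuel pos pending saw = false := by
  intro fuel
  induction fuel with
  | zero => intro pos pending saw _ _; rfl
  | succ f ih =>
    intro pos pending saw hp hlen
    rw [runP, if_neg (by omega : ¬ pending = 0)]
    rcases h : gene[pos]? with _ | tok
    · simp
    · obtain ⟨hpos, -⟩ := List.getElem?_eq_some_iff.mp h
      simp only []
      exact ih (pos+1) _ _ (by omega) (by omega)

-- A's loop simulates the automaton: pending = para+1-i, saw = (func_pos_list nonempty)
theorem Asim (gene : List String) :
    ∀ fuel1 fuel2 i para funcs,
      gene.length + 1 ≤ fuel1 + i → gene.length + 1 ≤ fuel2 + i →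
      i ≤ para + 1 → (para < gene.length ∨ (i = 0 ∧ para = 0)) →
      loopA gene fuel1 i para funcs = runP gene fuel2 i (para + 1 - i) (decide (0 < funcs.length)) := by
  intro fuel1
  induction fuel1 with
  | zero =>
    intro fuel2 i para funcs h1 h2 hi hpara
    exfalso; rcases hpara with h | ⟨h0, _⟩ <;> omega
  | succ f1 ih =>
    intro fuel2 i para funcs h1 h2 hi hpara
    have hil : i ≤ gene.length := by rcases hpara with h | ⟨h0, _⟩ <;> omega
    rcases fuel2 with _ | f2
    · exfalso; omega
    by_cases hloop : i ≤ para
    · have hpend : ¬ (para + 1 - i = 0) := by omega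
      simp only [loopA, if_pos hloop, runP, if_neg hpend]
      rcases hg : gene[i]? with _ | tok
      · simp
      have hipos : i < gene.length := (List.getElem?_eq_some_iff.mp hg).1
      by_cases hop : tok ∈ operator_list
      · have har : 0 < opArity tok := (mem_iff_arity tok).mp hop
        simp only [if_pos hop]
        by_cases hov : gene.length ≤ para + opArity tok
        · simp only [if_pos hov]
          exact (runP_false gene f2 (i+1) (para + 1 - i - 1 + opArity tok) _
            (by omega) (by omega)).symm
        · simp only [if_neg hov]
          have := ih f2 (i+1) (para + opArity tok) (funcs ++ [i])
            (by omega) (by omega) (by omega) (by omega)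
          rw [this]
          congr 1
          · omega
          · simp [har]
      · have har : ¬ 0 < opArity tok := fun h => hop ((mem_iff_arity tok).mpr h)
        simp only [if_neg hop]
        have := ih f2 (i+1) para funcs (by omega) (by omega) (by omega)
          (by left; omega)
        rw [this]
        congr 1
        · omega
        · simp [Nat.not_lt.mp (by omega : ¬ 0 < opArity tok)]
    · have hpend : para + 1 - i = 0 := by omega
      simp [loopA, if_neg hloop, runP, hpend]

-- B's loop simulates the automaton: pending = stack.sum
theorem Bsim (gene : List String) :
    ∀ fuel1 fuel2 st pos saw,
      gene.length + 1 ≤ fuel2 + pos → pos ≤ gene.length →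
      2 * (gene.length + 1 - pos) + st.length + 1 ≤ fuel1 →
      loopB gene fuel1 st pos saw = runP gene fuel2 pos st.sum saw := by
  intro fuel1
  induction fuel1 with
  | zero => intro fuel2 st pos saw h2 hpos h1; omega
  | succ f1 ih =>
    intro fuel2 st pos saw h2 hpos h1
    rcases fuel2 with _ | f2
    · omega
    rcases st with _ | ⟨c, rest⟩
    · simp [loopB, runP]
    by_cases hc : c = 0
    · subst hc
      rw [show loopB gene (f1+1) (0 :: rest) pos saw = loopB gene f1 rest pos saw from by
        simp [loopB]]
      rw [ih (f2+1) rest pos saw h2 hpos (by simp at h1 ⊢; omega)]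
      simp
    · have hpend : ¬ (c + rest.sum = 0) := by omega
      by_cases hov : gene.length ≤ pos
      · have hg : gene[pos]? = none := List.getElem?_eq_none hov
        simp [loopB, runP, hc, hov]
      · have hlt : pos < gene.length := by omega
        have hg : gene[pos]? = some gene[pos] := List.getElem?_eq_getElem hlt
        by_cases har : 0 < opArity gene[pos]
        · rw [show loopB gene (f1+1) (c :: rest) pos saw
              = loopB gene f1 (opArity gene[pos] :: (c-1) :: rest) (pos+1) true from by
            simp [loopB, hc, hov, hg, har]]
          rw [ih f2 _ (pos+1) true (by omega) (by omega) (by simp at h1 ⊢; omega)]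
          simp only [runP, if_neg hpend, hg, List.sum_cons]
          congr 1
          · omega
          · simp [har]
        · rw [show loopB gene (f1+1) (c :: rest) pos saw
              = loopB gene f1 ((c-1) :: rest) (pos+1) saw from by
            simp [loopB, hc, hov, hg, har]]
          rw [ih f2 _ (pos+1) saw (by omega) (by omega) (by simp at h1 ⊢; omega)]
          simp only [runP, if_neg hpend, hg, List.sum_cons]
          congr 1
          · omega
          · simp [har]

-- ===== VERDICT (by name: the statement is the Claim_ definition above) =====
theorem decoding_gene_spec : Claim_equal_decoding_gene := by
  intro gene _ _
  unfold Spec_decoding_gene decoding_gene decoding_gene_alt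
  have hA := Asim gene (gene.length + 1) (gene.length + 1) 0 0 []
    (by omega) (by omega) (by omega) (Or.inr ⟨rfl, rfl⟩)
  have hB := Bsim gene (2 * gene.length + 4) (gene.length + 1) [1] 0 false
    (by omega) (by omega) (by simp; omega)
  simp only [List.sum_cons, List.sum_nil] at hB
  simp only [List.length_nil] at hA
  rw [hA, hB]
  norm_num
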